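-- pv_equiv track=rewrite | github.com/rsarwas/aoc | 2024-24/answers.py | parse
-- ===== SOURCE A (Python) =====
-- def parse(lines):
--     """Convert the lines of text into a useful data model."""
--     inputs = {}
--     gates = {}
--     in_part1 = True
--     for line in lines:
--         line = line.strip()
--         if not line:
--             in_part1 = False
--             continue
--         if in_part1:
--             name, value = line.split(": ")
--             inputs[name] = value == "1"
--         else:
--             wire1, op, wire2, _, output = line.split(" ")
--             gates[output] = (op, wire1, wire2)
--     return inputs, gates
-- ===== SOURCE B (Python) =====
-- def parse(lines):
--     """Convert the lines of text into a useful data model."""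
--     stripped = [line.strip() for line in lines]
--     try:
--         i = stripped.index("")
--     except ValueError:
--         i = len(stripped)
--     inputs = {}
--     for line in stripped[:i]:
--         name, value = line.split(": ")
--         inputs[name] = value == "1"
--     gates = {}
--     for line in stripped[i:]:
--         if not line:
--             continue
--         wire1, op, wire2, _, output = line.split(" ")
--         gates[output] = (op, wire1, wire2)
--     return inputs, gates
-- ===== Notes on version B (the rewrite author's own statement) =====
-- stated objective: simpler
-- what changed: Replaces the stateful in_part1 flag loop by locating the first blank (stripped) line once and running two independent loops over the two slices (inputs before it, gates after it, skipping blanks).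
import Mathlib
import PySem

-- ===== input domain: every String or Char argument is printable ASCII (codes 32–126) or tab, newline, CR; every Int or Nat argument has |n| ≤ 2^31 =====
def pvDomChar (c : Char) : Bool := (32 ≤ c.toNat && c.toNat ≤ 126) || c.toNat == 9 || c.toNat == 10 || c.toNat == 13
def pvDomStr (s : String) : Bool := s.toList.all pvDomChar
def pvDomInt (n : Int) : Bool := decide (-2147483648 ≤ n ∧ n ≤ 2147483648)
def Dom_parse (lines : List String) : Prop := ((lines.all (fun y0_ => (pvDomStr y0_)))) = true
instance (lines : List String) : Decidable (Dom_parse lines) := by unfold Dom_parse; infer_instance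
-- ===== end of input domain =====

-- ===== PORT A =====
-- s.split(sep) with a nonempty literal sep: split? is always `some` there, so getD [] is exact.
def pySplit (s sep : String) : List String := (PySem.Str.split? s sep).getD []

-- B changes only the decomposition (two slice loops instead of one flagged loop); behaviour is identical.
-- State of A's single loop: (inputs dict, gates dict, in_part1 flag).
def parseStep (st : PySem.Dict String Bool × PySem.Dict String (String × String × String) × Bool)
    (line : String) : PySem.Dict String Bool × PySem.Dict String (String × String × String) × Bool :=
  let l := PySem.Str.strip line
  if l = "" then (st.1, st.2.1, false)
  else if st.2.2 then
    match pySplit l ": " with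
    | [name, value] => (st.1.insert name (value == "1"), st.2.1, st.2.2)
    | _ => st        -- Python raises ValueError here; excluded by Pre_parse
  else
    match pySplit l " " with
    | [w1, op, w2, _, out] => (st.1, st.2.1.insert out (op, w1, w2), st.2.2)
    | _ => st        -- Python raises ValueError here; excluded by Pre_parse

def parse (lines : List String) : (List (String × Bool)) × (List (String × String × String × String)) :=
  let st := lines.foldl parseStep (PySem.Dict.empty, PySem.Dict.empty, true)
  (st.1.items, st.2.1.items)

-- ===== PORT B =====
-- Loop bodies of B's two independent loops (Source B's two for-loops).
def inStep (d : PySem.Dict String Bool) (l : String) : PySem.Dict String Bool :=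
  match pySplit l ": " with
  | [name, value] => d.insert name (value == "1")
  | _ => d         -- Python raises ValueError here; excluded by Pre_parse

def gStep (d : PySem.Dict String (String × String × String)) (l : String) :
    PySem.Dict String (String × String × String) :=
  if l = "" then d
  else match pySplit l " " with
  | [w1, op, w2, _, out] => d.insert out (op, w1, w2)
  | _ => d         -- Python raises ValueError here; excluded by Pre_parse

def inputsLoop (d : PySem.Dict String Bool) (ls : List String) : PySem.Dict String Bool :=
  ls.foldl inStep d

def gatesLoop (d : PySem.Dict String (String × String × String)) (ls : List String) :
    PySem.Dict String (String × String × String) :=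
  ls.foldl gStep d

def parse_alt (lines : List String) : (List (String × Bool)) × (List (String × String × String × String)) :=
  let stripped := lines.map PySem.Str.strip
  let i := (PySem.List.index? stripped "").getD stripped.length
  ((inputsLoop PySem.Dict.empty (stripped.take i)).items,
   (gatesLoop PySem.Dict.empty (stripped.drop i)).items)

-- ===== PRECONDITION & SPEC =====
-- Pre_ excludes exactly the malformed lines on which Python's tuple unpacking raises ValueError:
-- an input line (before the first blank stripped line) whose strip does not split on ": " into 2 parts,
-- or a non-blank gate line (from the first blank on) whose strip does not split on " " into 5 parts.
def Pre_parse (lines : List String) : Prop :=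
  let stripped := lines.map PySem.Str.strip
  let i := (PySem.List.index? stripped "").getD stripped.length
  (∀ l ∈ stripped.take i, (pySplit l ": ").length = 2) ∧
  (∀ l ∈ stripped.drop i, l ≠ "" → (pySplit l " ").length = 5)
instance (lines : List String) : Decidable (Pre_parse lines) := by unfold Pre_parse; infer_instance
def pvWitness_parse : List String := ["x00: 1", "y00: 0", "", "x00 AND y00 -> z00"]
def Spec_parse (lines : List String) (out : (List (String × Bool)) × (List (String × String × String × String))) : Prop := out = parse_alt lines
instance (lines : List String) (out : (List (String × Bool)) × (List (String × String × String × String))) : Decidable (Spec_parse lines out) := by unfold Spec_parse; infer_instance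

-- ===== CLAIM (what is proved, stated in full; the proofs are below) =====
def Claim_equal_parse : Prop := ∀ (lines : List String), Dom_parse lines → Pre_parse lines → Spec_parse lines (parse lines)

-- ===== LEMMAS AND PROOFS =====

-- Step equations for A's loop body, phrased with B's loop bodies.
theorem parseStep_blank (st : PySem.Dict String Bool × PySem.Dict String (String × String × String) × Bool)
    (l : String) (h : PySem.Str.strip l = "") : parseStep st l = (st.1, st.2.1, false) := by
  unfold parseStep
  rw [if_pos h]

theorem parseStep_true (di : PySem.Dict String Bool) (dg : PySem.Dict String (String × String × String))
    (l : String) (h : PySem.Str.strip l ≠ "") :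
    parseStep (di, dg, true) l = (inStep di (PySem.Str.strip l), dg, true) := by
  unfold parseStep inStep
  rw [if_neg h, if_pos rfl]
  rcases pySplit (PySem.Str.strip l) ": " with _ | ⟨a, _ | ⟨b, _ | _⟩⟩ <;> rfl

theorem parseStep_false (di : PySem.Dict String Bool) (dg : PySem.Dict String (String × String × String))
    (l : String) (h : PySem.Str.strip l ≠ "") :
    parseStep (di, dg, false) l = (di, gStep dg (PySem.Str.strip l), false) := by
  unfold parseStep gStep
  rw [if_neg h, if_neg (by simp), if_neg h]
  rcases pySplit (PySem.Str.strip l) " " with _ | ⟨a, _ | ⟨b, _ | ⟨c, _ | ⟨d, _ | ⟨e, _ | _⟩⟩⟩⟩⟩ <;> rfl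

theorem gStep_blank (dg : PySem.Dict String (String × String × String)) : gStep dg "" = dg := by
  simp [gStep]

-- Once the flag is false, A's loop leaves inputs untouched and runs exactly B's gates loop on the stripped rest.
theorem foldl_parseStep_false (ls : List String) (di : PySem.Dict String Bool)
    (dg : PySem.Dict String (String × String × String)) :
    ls.foldl parseStep (di, dg, false) = (di, gatesLoop dg (ls.map PySem.Str.strip), false) := by
  induction ls generalizing dg with
  | nil => rfl
  | cons l ls ih =>
    rw [List.foldl_cons, List.map_cons]
    by_cases h : PySem.Str.strip l = ""
    · rw [parseStep_blank _ _ h, ih, h, show gatesLoop dg ("" :: ls.map PySem.Str.strip)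
        = gatesLoop (gStep dg "") (ls.map PySem.Str.strip) from rfl, gStep_blank]
    · rw [parseStep_false _ _ _ h, ih]; rfl

-- With the flag true, A's loop is B: inputs loop on the slice before the first blank, gates loop after.
theorem foldl_parseStep_true (ls : List String) (di : PySem.Dict String Bool)
    (dg : PySem.Dict String (String × String × String)) :
    ls.foldl parseStep (di, dg, true) =
      (inputsLoop di ((ls.map PySem.Str.strip).take
          ((PySem.List.index? (ls.map PySem.Str.strip) "").getD (ls.map PySem.Str.strip).length)),
       gatesLoop dg ((ls.map PySem.Str.strip).drop
          ((PySem.List.index? (ls.map PySem.Str.strip) "").getD (ls.map PySem.Str.strip).length)),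
       !(ls.map PySem.Str.strip).contains "") := by
  induction ls generalizing di with
  | nil => rfl
  | cons l ls ih =>
    rw [List.foldl_cons, List.map_cons]
    by_cases h : PySem.Str.strip l = ""
    · rw [parseStep_blank _ _ h, foldl_parseStep_false, h, PySem.List.index?_cons_self]
      simp [inputsLoop, gStep_blank, show gatesLoop dg ("" :: ls.map PySem.Str.strip)
        = gatesLoop (gStep dg "") (ls.map PySem.Str.strip) from rfl]
    · rw [parseStep_true _ _ _ h, ih]
      rw [PySem.List.index?_cons_of_ne _ h]
      rcases hj : PySem.List.index? (ls.map PySem.Str.strip) "" with _ | j <;>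
        simp [Ne.symm h, inputsLoop, List.take_succ_cons, List.drop_succ_cons]

-- ===== VERDICT (by name: the statement is the Claim_ definition above) =====
theorem parse_spec : Claim_equal_parse := by
  intro lines _ _
  show parse lines = parse_alt lines
  unfold parse parse_alt
  rw [foldl_parseStep_true]
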